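-- pv_equiv track=rewrite | github.com/keygenlain/PrintLooper | printlooper.py | find_end_gcode_start
-- ===== SOURCE A (Python) =====
-- from typing import List, Optional
--
-- def find_end_gcode_start(lines: List[str]) -> int:
--     """Find where the end GCODE sequence starts"""
--     # Look for common end GCODE markers
--     for i in range(len(lines) - 1, -1, -1):
--         line = lines[i].strip().upper()
--         # Look for heating off commands or end comments
--         if any(marker in line for marker in [
--             'M104 S0',  # Turn off hotend
--             'M140 S0',  # Turn off bed
--             'M106 S0',  # Turn off fan
--             '; END GCODE',
--             ';END GCODE'
--         ]):
--             return i
--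
--     # If no end sequence found, return last 20 lines
--     return max(0, len(lines) - 20)
-- ===== SOURCE B (Python) =====
-- def find_end_gcode_start(lines):
--     """Find where the end GCODE sequence starts"""
--     markers = ['M104 S0', 'M140 S0', 'M106 S0', '; END GCODE', ';END GCODE']
--     # Single forward pass: record every matching line index, pick the last.
--     hits = []
--     for i, raw in enumerate(lines):
--         line = raw.strip().upper()
--         if any(marker in line for marker in markers):
--             hits.append(i)
--     if hits:
--         return hits[-1]
--     return max(0, len(lines) - 20)
-- ===== Notes on version B (the rewrite author's own statement) =====
-- stated objective: alternative
-- what changed: Replaces A's backward scan with early return by a single forward pass over enumerate(lines) that materialises the list of all matching indices and then selects its last element (fallback unchanged).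
import Mathlib
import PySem

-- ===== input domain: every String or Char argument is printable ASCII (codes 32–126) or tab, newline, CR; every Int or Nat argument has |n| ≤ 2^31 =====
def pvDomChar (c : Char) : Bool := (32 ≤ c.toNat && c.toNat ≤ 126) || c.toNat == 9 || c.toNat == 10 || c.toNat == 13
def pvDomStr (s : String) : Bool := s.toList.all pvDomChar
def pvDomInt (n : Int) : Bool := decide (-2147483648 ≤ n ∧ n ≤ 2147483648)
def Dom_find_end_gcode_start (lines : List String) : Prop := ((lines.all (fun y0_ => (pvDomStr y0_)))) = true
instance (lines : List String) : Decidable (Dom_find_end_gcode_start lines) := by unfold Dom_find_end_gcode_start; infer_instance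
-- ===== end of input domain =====

-- ===== PORT A =====
-- B changes the decomposition: a single forward pass materialising all matching
-- indices, then selecting the last, instead of A's backward early-return scan.

-- line.strip().upper() contains any of the end-gcode markers
def pvHitA (s : String) : Bool :=
  ["M104 S0", "M140 S0", "M106 S0", "; END GCODE", ";END GCODE"].any
    (fun marker => PySem.Str.isIn marker (PySem.Str.upper (PySem.Str.strip s)))

-- the 'for i in range(len(lines)-1, -1, -1)' loop with its early return;
-- the index i comes from the range so lines[i] is always in bounds (getD "" is never used)
def pvScanA (lines : List String) : List Int → Int
  | [] => max 0 ((PySem.List.len lines : Int) - 20)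
  | i :: rest =>
      if pvHitA (PySem.List.pyGetD lines i "") then i else pvScanA lines rest

def find_end_gcode_start (lines : List String) : Int :=
  pvScanA lines (PySem.List.pyRange ((PySem.List.len lines : Int) - 1) (-1) (-1))

-- ===== PORT B =====
def pvHitB (s : String) : Bool :=
  ["M104 S0", "M140 S0", "M106 S0", "; END GCODE", ";END GCODE"].any
    (fun marker => PySem.Str.isIn marker (PySem.Str.upper (PySem.Str.strip s)))

def find_end_gcode_start_alt (lines : List String) : Int :=
  let hits : List Int :=
    (PySem.List.enumerate lines 0).foldl
      (fun acc p => if pvHitB p.2 then acc ++ [p.1] else acc) []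
  match hits.getLast? with
  | some i => i
  | none => max 0 ((PySem.List.len lines : Int) - 20)

-- ===== PRECONDITION & SPEC =====
def Spec_find_end_gcode_start (lines : List String) (out : Int) : Prop := out = find_end_gcode_start_alt lines
instance (lines : List String) (out : Int) : Decidable (Spec_find_end_gcode_start lines out) := by unfold Spec_find_end_gcode_start; infer_instance

-- ===== CLAIM (what is proved, stated in full; the proofs are below) =====
def Claim_equal_find_end_gcode_start : Prop := ∀ (lines : List String), Dom_find_end_gcode_start lines → Spec_find_end_gcode_start lines (find_end_gcode_start lines)

-- ===== LEMMAS AND PROOFS =====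

-- A's early-return scan returns the first hit of its index list (else the fallback)
theorem pvScanA_eq_filter_head (lines : List String) (l : List Int) :
    pvScanA lines l =
      match (l.filter (fun i => pvHitA (PySem.List.pyGetD lines i ""))).head? with
      | some i => i
      | none => max 0 ((PySem.List.len lines : Int) - 20) := by
  induction l with
  | nil => simp [pvScanA]
  | cons i rest ih =>
      by_cases h : pvHitA (PySem.List.pyGetD lines i "")
      · simp [pvScanA, h]
      · simp [pvScanA, h, ih]

theorem find_end_gcode_start_eq (lines : List String) :
    find_end_gcode_start lines = find_end_gcode_start_alt lines := by
  unfold find_end_gcode_start find_end_gcode_start_alt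
  rw [pvScanA_eq_filter_head]
  rw [PySem.List.foldl_append_if (fun p : Int × String => pvHitB p.2) (fun p => p.1)]
  rw [PySem.List.enumerate_eq_map_pyRange lines ""]
  have hrange : PySem.List.pyRange ((PySem.List.len lines : Int) - 1) (-1) (-1)
      = (PySem.List.pyRange 0 (PySem.List.len lines : Int)).reverse := by
    rw [PySem.List.pyRange_neg_one_eq_reverse]
    norm_num
  rw [hrange, List.filter_reverse, List.head?_reverse]
  rw [List.filter_map, List.map_map]
  have hAB : pvHitA = pvHitB := rfl
  simp only [Function.comp_def, hAB]
  cases hf : List.find? (fun i => pvHitB (PySem.List.pyGetD lines i ""))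
      ((PySem.List.pyRange 0 (lines.length : Int)).reverse) <;>
    simp [hf]

-- ===== VERDICT (by name: the statement is the Claim_ definition above) =====
theorem find_end_gcode_start_spec : Claim_equal_find_end_gcode_start := by
  intro lines _
  unfold Spec_find_end_gcode_start
  exact find_end_gcode_start_eq lines
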